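-- pv_equiv track=rewrite | github.com/ljcleo/hardcore-logic | prepare/src/skyscraper/gen_uns_lagersize.py | calculate_visibility
-- ===== SOURCE A (Python) =====
-- def calculate_visibility(grid, size):
--     vis = []
--     top = []
--     for c in range(size):
--         max_h, cnt = 0, 0
--         for r in range(size):
--             if grid[r][c] > max_h:
--                 max_h = grid[r][c]
--                 cnt += 1
--         top.append(cnt)
--     vis.append(top)
--     bottom = []
--     for c in range(size):
--         max_h, cnt = 0, 0
--         for r in range(size - 1, -1, -1):
--             if grid[r][c] > max_h:
--                 max_h = grid[r][c]
--                 cnt += 1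
--         bottom.append(cnt)
--     vis.append(bottom)
--     left = []
--     for r in range(size):
--         max_h, cnt = 0, 0
--         for c in range(size):
--             if grid[r][c] > max_h:
--                 max_h = grid[r][c]
--                 cnt += 1
--         left.append(cnt)
--     vis.append(left)
--     right = []
--     for r in range(size):
--         max_h, cnt = 0, 0
--         for c in range(size - 1, -1, -1):
--             if grid[r][c] > max_h:
--                 max_h = grid[r][c]
--                 cnt += 1
--         right.append(cnt)
--     vis.append(right)
--     return vis
-- ===== SOURCE B (Python) =====
-- def visible_count(line):
--     # filter-and-shrink: the first remaining building is visible; only strictly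
--     # taller ones behind it can still be seen, so filter and repeat.
--     line = [h for h in line if h > 0]
--     cnt = 0
--     while line:
--         cnt += 1
--         line = [h for h in line[1:] if h > line[0]]
--     return cnt
--
--
-- def calculate_visibility(grid, size):
--     rows = [grid[r][:size] for r in range(size)]
--     cols = [list(c) for c in zip(*rows)]
--     return [
--         [visible_count(c) for c in cols],
--         [visible_count(list(reversed(c))) for c in cols],
--         [visible_count(r) for r in rows],
--         [visible_count(list(reversed(r))) for r in rows],
--     ]
-- ===== Notes on version B (the rewrite author's own statement) =====
-- stated objective: alternative
-- what changed: Replaces A's four inline running-max/counter double loops with a filter-and-shrink visibility helper (keep positives, repeatedly count the front building and filter the tail to strictly taller ones) applied to rows, transposed columns and their reversals; no running maximum is maintained.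
import Mathlib
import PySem

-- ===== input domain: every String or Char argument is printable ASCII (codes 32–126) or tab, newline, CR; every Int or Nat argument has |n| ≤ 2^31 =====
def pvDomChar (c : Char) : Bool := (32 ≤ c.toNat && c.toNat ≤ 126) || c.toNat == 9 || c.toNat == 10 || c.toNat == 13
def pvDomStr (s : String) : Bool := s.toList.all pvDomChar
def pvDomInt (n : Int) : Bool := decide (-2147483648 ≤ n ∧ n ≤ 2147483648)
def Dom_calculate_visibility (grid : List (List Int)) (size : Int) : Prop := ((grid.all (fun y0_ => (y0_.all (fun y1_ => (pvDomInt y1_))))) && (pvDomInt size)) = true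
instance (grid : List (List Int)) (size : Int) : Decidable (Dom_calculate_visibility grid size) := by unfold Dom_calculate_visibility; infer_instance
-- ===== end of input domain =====

-- B replaces A's four running-max/counter index loops with a filter-and-shrink visibility helper
-- (keep positives, count the front, filter the tail to strictly taller) applied to rows,
-- transposed columns and their reversals (objective: alternative).

-- ===== PORT A =====
def calculate_visibility (grid : List (List Int)) (size : Int) : List (List Int) :=
  let top := (PySem.List.pyRange 0 size 1).map (fun c =>
    ((PySem.List.pyRange 0 size 1).foldl
      (fun (st : Int × Int) r =>
        if PySem.List.pyGetD (PySem.List.pyGetD grid r ([] : List Int)) c 0 > st.1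
        then (PySem.List.pyGetD (PySem.List.pyGetD grid r ([] : List Int)) c 0, st.2 + 1)
        else st) (0, 0)).2)
  let bottom := (PySem.List.pyRange 0 size 1).map (fun c =>
    ((PySem.List.pyRange (size - 1) (-1) (-1)).foldl
      (fun (st : Int × Int) r =>
        if PySem.List.pyGetD (PySem.List.pyGetD grid r ([] : List Int)) c 0 > st.1
        then (PySem.List.pyGetD (PySem.List.pyGetD grid r ([] : List Int)) c 0, st.2 + 1)
        else st) (0, 0)).2)
  let left := (PySem.List.pyRange 0 size 1).map (fun r =>
    ((PySem.List.pyRange 0 size 1).foldl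
      (fun (st : Int × Int) c =>
        if PySem.List.pyGetD (PySem.List.pyGetD grid r ([] : List Int)) c 0 > st.1
        then (PySem.List.pyGetD (PySem.List.pyGetD grid r ([] : List Int)) c 0, st.2 + 1)
        else st) (0, 0)).2)
  let right := (PySem.List.pyRange 0 size 1).map (fun r =>
    ((PySem.List.pyRange (size - 1) (-1) (-1)).foldl
      (fun (st : Int × Int) c =>
        if PySem.List.pyGetD (PySem.List.pyGetD grid r ([] : List Int)) c 0 > st.1
        then (PySem.List.pyGetD (PySem.List.pyGetD grid r ([] : List Int)) c 0, st.2 + 1)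
        else st) (0, 0)).2)
  [top, bottom, left, right]

-- ===== PORT B =====
-- the while loop of visible_count: cnt += 1; line = [h for h in line[1:] if h > line[0]]
def pvVisLoop : List Int → Int
  | [] => 0
  | h :: t => 1 + pvVisLoop (t.filter (fun x => h < x))
termination_by l => l.length
decreasing_by
  have hle := List.length_filter_le (fun x : {x // x ∈ t} => decide (h < ↑x)) t.attach
  simp only [List.length_attach] at hle
  simp
  omega

-- line = [h for h in line if h > 0], then the loop
def pvVisibleCount (line : List Int) : Int :=
  pvVisLoop (line.filter (fun h => 0 < h))

-- hand port of zip(*rows): truncates every column to the shortest row, empty for no rows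
def pvZipStar (rows : List (List Int)) : List (List Int) :=
  match (rows.map List.length).min? with
  | none => []
  | some w => (List.range w).map (fun i => rows.map (fun row => row.getD i 0))

def calculate_visibility_alt (grid : List (List Int)) (size : Int) : List (List Int) :=
  let rows := (PySem.List.pyRange 0 size 1).map (fun r =>
    PySem.List.slice (PySem.List.pyGetD grid r ([] : List Int)) none (some size))
  let cols := pvZipStar rows
  [cols.map pvVisibleCount,
   cols.map (fun c => pvVisibleCount c.reverse),
   rows.map pvVisibleCount,
   rows.map (fun r => pvVisibleCount r.reverse)]

-- ===== PRECONDITION & SPEC =====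
-- Pre_ excludes exactly the inputs where A raises IndexError: fewer than `size` rows, or a row
-- among the first `size` shorter than `size`.
def Pre_calculate_visibility (grid : List (List Int)) (size : Int) : Prop :=
  size ≤ (grid.length : Int) ∧ ∀ row ∈ grid.take size.toNat, size ≤ (row.length : Int)

instance (grid : List (List Int)) (size : Int) : Decidable (Pre_calculate_visibility grid size) := by
  unfold Pre_calculate_visibility; infer_instance

def pvWitness_calculate_visibility : List (List Int) × Int := ([[1, 2], [2, 1]], 2)

def Spec_calculate_visibility (grid : List (List Int)) (size : Int) (out : List (List Int)) : Prop := out = calculate_visibility_alt grid size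
instance (grid : List (List Int)) (size : Int) (out : List (List Int)) : Decidable (Spec_calculate_visibility grid size out) := by unfold Spec_calculate_visibility; infer_instance

-- ===== CLAIM (what is proved, stated in full; the proofs are below) =====
def Claim_equal_calculate_visibility : Prop := ∀ (grid : List (List Int)) (size : Int), Dom_calculate_visibility grid size → Pre_calculate_visibility grid size → Spec_calculate_visibility grid size (calculate_visibility grid size)

-- ===== LEMMAS AND PROOFS =====

lemma pvVisLoop_nil : pvVisLoop [] = 0 := by rw [pvVisLoop]

lemma pvVisLoop_cons (h : Int) (t : List Int) :
    pvVisLoop (h :: t) = 1 + pvVisLoop (t.filter (fun x => h < x)) := by rw [pvVisLoop]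

/-- Visibility count along a line with running maximum `m` (A's inner-loop shape). -/
def gcount (m : Int) : List Int → Int
  | [] => 0
  | h :: t => (if h > m then 1 else 0) + gcount (max m h) t

lemma stepFoldF (f : Int → Int) (idx : List Int) : ∀ (m c : Int),
    (idx.foldl (fun (st : Int × Int) i => if f i > st.1 then (f i, st.2 + 1) else st) (m, c)).2
      = c + gcount m (idx.map f) := by
  induction idx with
  | nil => intro m c; simp [gcount]
  | cons i t ih =>
    intro m c
    simp only [List.foldl_cons, List.map_cons, gcount]
    by_cases hm : f i > m
    · have hx : max m (f i) = f i := by omega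
      rw [if_pos hm, ih, hx]; omega
    · have hx : max m (f i) = m := by omega
      rw [if_neg hm, ih, hx]; omega

/-- The running-max count above threshold `m` equals B's shrink loop on the `> m`-filtered line. -/
lemma gcount_eq_visLoop (line : List Int) : ∀ (m : Int),
    gcount m line = pvVisLoop (line.filter (fun x => m < x)) := by
  induction line with
  | nil => intro m; simp [gcount, pvVisLoop_nil]
  | cons h t ih =>
    intro m
    simp only [gcount, List.filter_cons]
    by_cases hm : h > m
    · have hmax : max m h = h := by omega
      rw [if_pos hm, hmax, ih h]
      have hfil : (t.filter (fun x => m < x)).filter (fun x => h < x)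
          = t.filter (fun x => h < x) := by
        rw [List.filter_filter]
        apply List.filter_congr
        intro x _
        by_cases hx : h < x
        · simp [hx, show m < x by omega]
        · simp [hx]
      rw [if_pos (decide_eq_true hm), pvVisLoop_cons, hfil]
    · have hmax : max m h = m := by omega
      rw [if_neg hm, hmax, ih m]
      rw [if_neg (by simp only [decide_eq_true_eq]; omega)]
      omega

/-- B's per-line helper equals the max/counter accumulation seeded at 0. -/
lemma pvVisibleCount_eq (line : List Int) : pvVisibleCount line = gcount 0 line := by
  rw [pvVisibleCount, gcount_eq_visLoop]

lemma min?_all_eq (n : Nat) : ∀ (l : List Nat), (∀ x ∈ l, x = n) → l ≠ [] → l.min? = some n := by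
  intro l
  induction l with
  | nil => intro _ hne; cases hne rfl
  | cons a t ih =>
    intro h _
    have ha : a = n := h a (by simp)
    rw [List.min?_cons]
    by_cases ht : t = []
    · subst ht; simp [ha]
    · rw [ih (fun x hx => h x (by simp [hx])) ht]
      simp [ha]

lemma map_getD_range (l : List Int) (n : Nat) (h : n ≤ l.length) :
    (List.range n).map (fun i => l.getD i 0) = l.take n := by
  apply List.ext_getElem
  · simp; omega
  · intro i h1 h2
    simp only [List.length_map, List.length_range] at h1
    simp only [List.getElem_map, List.getElem_range, List.getElem_take]
    rw [List.getD_eq_getElem _ _ (by omega)]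

-- ===== VERDICT (by name: the statement is the Claim_ definition above) =====
theorem calculate_visibility_spec : Claim_equal_calculate_visibility := by
  intro grid size _ hpre
  obtain ⟨hlen, hrows⟩ := hpre
  show calculate_visibility grid size = calculate_visibility_alt grid size
  by_cases hpos : 0 < size
  case neg =>
    have h1 : PySem.List.pyRange 0 size 1 = [] := PySem.List.pyRange_one_eq_nil (by omega)
    have h2 : PySem.List.pyRange (size - 1) (-1) (-1) = [] :=
      PySem.List.pyRange_neg_one_eq_nil (by omega)
    simp [calculate_visibility, calculate_visibility_alt, h1, h2, pvZipStar]
  case pos =>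
    set n := size.toNat with hn
    have hsz : (n : Int) = size := by omega
    have hnlen : n ≤ grid.length := by omega
    have hrowlen : ∀ k, k < n → n ≤ (grid.getD k []).length := by
      intro k hk
      have hkg : k < grid.length := lt_of_lt_of_le hk hnlen
      rw [List.getD_eq_getElem _ _ hkg]
      have hkt : k < (grid.take n).length := by simp; omega
      have hmem : (grid.take n)[k] ∈ grid.take n := List.getElem_mem hkt
      have heq : (grid.take n)[k] = grid[k] := by simp
      have := hrows _ hmem
      rw [heq] at this
      omega
    have hr1 : PySem.List.pyRange 0 size 1 = (List.range n).map (fun k : Nat => (k : Int)) := by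
      apply List.ext_getElem
      · rw [PySem.List.length_pyRange_one]
        simp only [List.length_map, List.length_range]
        omega
      · intro i h1 h2
        simp [PySem.List.getElem_pyRange_one]
    have e1 : (-1 : Int) + 1 = 0 := by norm_num
    have e2 : size - 1 + 1 = size := by ring
    have hr2 : PySem.List.pyRange (size - 1) (-1) (-1)
        = ((List.range n).map (fun k : Nat => (k : Int))).reverse := by
      rw [PySem.List.pyRange_neg_one_eq_reverse, e1, e2, hr1]
    have hcell : ∀ (r c : Nat), r < n → c < n →
        PySem.List.pyGetD (PySem.List.pyGetD grid (r : Int) ([] : List Int)) (c : Int) 0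
          = (grid.getD r []).getD c 0 := by
      intro r c _ _
      simp [PySem.List.pyGetD_natCast]
    -- B's rows
    have hrowsB : ((List.range n).map (fun k : Nat => (k : Int))).map (fun r =>
          PySem.List.slice (PySem.List.pyGetD grid r ([] : List Int)) none (some size))
        = (List.range n).map (fun r => (grid.getD r []).take n) := by
      rw [List.map_map]
      apply List.map_congr_left
      intro k _
      simp only [Function.comp_apply, PySem.List.pyGetD_natCast]
      rw [PySem.List.slice_to _ (by omega)]
    have hrlen : ∀ k, k < n → ((grid.getD k []).take n).length = n := by
      intro k hk; simp; exact hrowlen k hk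
    -- the transposed columns
    have hcols : pvZipStar ((List.range n).map (fun r => (grid.getD r []).take n))
        = (List.range n).map (fun c =>
            (List.range n).map (fun r => (grid.getD r []).getD c 0)) := by
      unfold pvZipStar
      have hmin : (((List.range n).map (fun r => (grid.getD r []).take n)).map List.length).min?
          = some n := by
        apply min?_all_eq
        · intro x hx
          simp only [List.map_map, List.mem_map, List.mem_range, Function.comp_apply] at hx
          obtain ⟨k, hk, hkx⟩ := hx
          rw [← hkx]; exact hrlen k hk
        · simp; omega
      rw [hmin]
      apply List.map_congr_left
      intro c hc
      rw [List.map_map]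
      apply List.map_congr_left
      intro r hr
      simp only [Function.comp_apply]
      simp only [List.mem_range] at hc hr
      have hlr := hrowlen r hr
      have hc1 : c < (List.take n (grid.getD r [])).length := by
        rw [hrlen r hr]; exact hc
      have hc2 : c < (grid.getD r []).length := by omega
      rw [List.getD_eq_getElem _ _ hc1, List.getD_eq_getElem _ _ hc2]
      simp [List.getElem_take]
    -- assemble
    simp only [calculate_visibility, calculate_visibility_alt, hr1, hr2, hrowsB, hcols]
    refine List.cons_eq_cons.mpr ⟨?_, ?_⟩
    · -- top
      rw [List.map_map, List.map_map]
      apply List.map_congr_left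
      intro c hc
      simp only [Function.comp_apply]
      refine (stepFoldF
        (fun r => PySem.List.pyGetD (PySem.List.pyGetD grid r ([] : List Int)) (c : Int) 0)
        ((List.range n).map (fun k : Nat => (k : Int))) 0 0).trans ?_
      rw [pvVisibleCount_eq, zero_add, List.map_map]
      congr 1
      apply List.map_congr_left
      intro r hr
      simp only [Function.comp_apply]
      exact hcell r c (by simpa using hr) (by simpa using hc)
    refine List.cons_eq_cons.mpr ⟨?_, ?_⟩
    · -- bottom
      rw [List.map_map, List.map_map]
      apply List.map_congr_left
      intro c hc
      simp only [Function.comp_apply]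
      refine (stepFoldF
        (fun r => PySem.List.pyGetD (PySem.List.pyGetD grid r ([] : List Int)) (c : Int) 0)
        (((List.range n).map (fun k : Nat => (k : Int))).reverse) 0 0).trans ?_
      rw [pvVisibleCount_eq, zero_add, List.map_reverse, List.map_map]
      congr 2
      apply List.map_congr_left
      intro r hr
      simp only [Function.comp_apply]
      exact hcell r c (by simpa using hr) (by simpa using hc)
    refine List.cons_eq_cons.mpr ⟨?_, ?_⟩
    · -- left
      rw [List.map_map, List.map_map]
      apply List.map_congr_left
      intro r hr
      simp only [Function.comp_apply]
      refine (stepFoldF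
        (fun c => PySem.List.pyGetD (PySem.List.pyGetD grid (r : Int) ([] : List Int)) c 0)
        ((List.range n).map (fun k : Nat => (k : Int))) 0 0).trans ?_
      rw [pvVisibleCount_eq, zero_add, List.map_map]
      congr 1
      rw [← map_getD_range _ n (hrowlen r (by simpa using hr))]
      apply List.map_congr_left
      intro c hc
      simp only [Function.comp_apply]
      exact hcell r c (by simpa using hr) (by simpa using hc)
    refine List.cons_eq_cons.mpr ⟨?_, rfl⟩
    · -- right
      rw [List.map_map, List.map_map]
      apply List.map_congr_left
      intro r hr
      simp only [Function.comp_apply]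
      refine (stepFoldF
        (fun c => PySem.List.pyGetD (PySem.List.pyGetD grid (r : Int) ([] : List Int)) c 0)
        (((List.range n).map (fun k : Nat => (k : Int))).reverse) 0 0).trans ?_
      rw [pvVisibleCount_eq, zero_add, List.map_reverse, List.map_map]
      congr 2
      rw [← map_getD_range _ n (hrowlen r (by simpa using hr))]
      apply List.map_congr_left
      intro c hc
      simp only [Function.comp_apply]
      exact hcell r c (by simpa using hr) (by simpa using hc)
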